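-- pv_equiv track=rewrite | github.com/UT07/daily-job-hunt | lambdas/pipeline/tailor_resume.py | _count_macro_args
-- ===== SOURCE A (Python) =====
-- def _count_macro_args(tex: str, start: int) -> int:
--     """Count consecutive balanced {...} groups starting at `start`."""
--     i = start
--     count = 0
--     while i < len(tex):
--         while i < len(tex) and tex[i].isspace():
--             i += 1
--         if i >= len(tex) or tex[i] != "{":
--             break
--         depth = 0
--         j = i
--         closed = False
--         while j < len(tex):
--             ch = tex[j]
--             if ch == "\\" and j + 1 < len(tex):
--                 j += 2
--                 continue
--             if ch == "{":
--                 depth += 1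
--             elif ch == "}":
--                 depth -= 1
--                 if depth == 0:
--                     count += 1
--                     i = j + 1
--                     closed = True
--                     break
--             j += 1
--         if not closed:
--             break
--     return count
-- ===== SOURCE B (Python) =====
-- def _count_macro_args(tex: str, start: int) -> int:
--     """Count consecutive balanced {...} groups starting at `start`."""
--     n = len(tex)
--     i = start
--     depth = 0
--     count = 0
--     while i < n:
--         ch = tex[i]
--         if depth == 0:
--             if ch == "{":
--                 depth = 1
--             elif not ch.isspace():
--                 break
--         elif ch == "\\" and i + 1 < n:
--             i += 2
--             continue
--         elif ch == "{":
--             depth += 1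
--         elif ch == "}":
--             depth -= 1
--             if depth == 0:
--                 count += 1
--         i += 1
--     return count
-- ===== Notes on version B (the rewrite author's own statement) =====
-- stated objective: simpler
-- what changed: Replaced A's three nested flag-driven loops (whitespace skip, brace rescan with `closed` flag, outer restart) by one flat single-pass loop carrying a depth counter and count.
import Mathlib
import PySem

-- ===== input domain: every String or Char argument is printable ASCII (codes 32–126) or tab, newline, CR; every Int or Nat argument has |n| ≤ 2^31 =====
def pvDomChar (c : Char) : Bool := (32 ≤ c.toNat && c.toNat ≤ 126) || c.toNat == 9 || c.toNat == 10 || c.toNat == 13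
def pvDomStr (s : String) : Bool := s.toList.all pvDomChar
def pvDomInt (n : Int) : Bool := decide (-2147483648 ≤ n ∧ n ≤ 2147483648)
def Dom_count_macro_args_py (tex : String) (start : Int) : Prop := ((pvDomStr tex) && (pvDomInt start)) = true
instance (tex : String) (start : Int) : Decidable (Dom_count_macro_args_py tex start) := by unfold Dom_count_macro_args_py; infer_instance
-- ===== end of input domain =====

-- B replaces A's nested flag-driven loops by one single-pass depth-counter state machine (objective: simpler; same O(n) cost).
-- Loops are ported with a fuel parameter (index strictly increases, so (len - i).toNat steps always suffice); fuel is a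
-- totalization guard only, the per-step code is the transliteration of the Python.

-- ===== PORT A =====
-- A's inner whitespace loop: while i < len(tex) and tex[i].isspace(): i += 1
def pvSkipWsF (cs : List Char) : Nat → Int → Int
  | 0, i => i
  | fuel + 1, i =>
    if i < (cs.length : Int) then
      match PySem.List.pyGet? cs i with
      | some c => if PySem.Chars.isspace c then pvSkipWsF cs fuel (i + 1) else i
      | none => i          -- Python raises here; unreachable under Pre_
    else i

def pvSkipWs (cs : List Char) (i : Int) : Int :=
  pvSkipWsF cs ((cs.length : Int) - i).toNat i

-- A's inner brace loop (the `while j < len(tex)` body carrying depth); returns the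
-- index j at which depth hits 0 (A then does count += 1; i = j + 1), none = ran off the end.
def pvScanAF (cs : List Char) : Nat → Int → Int → Option Int
  | 0, _, _ => none
  | fuel + 1, j, depth =>
    if j < (cs.length : Int) then
      match PySem.List.pyGet? cs j with
      | none => none       -- Python raises here; unreachable under Pre_
      | some ch =>
        if ch = '\\' ∧ j + 1 < (cs.length : Int) then pvScanAF cs fuel (j + 2) depth
        else if ch = '{' then pvScanAF cs fuel (j + 1) (depth + 1)
        else if ch = '}' then
          if depth - 1 = 0 then some j else pvScanAF cs fuel (j + 1) (depth - 1)
        else pvScanAF cs fuel (j + 1) depth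
    else none

def pvScanA (cs : List Char) (j depth : Int) : Option Int :=
  pvScanAF cs ((cs.length : Int) - j).toNat j depth

-- A's outer `while i < len(tex)` loop with state (i, count)
def pvOuterAF (cs : List Char) : Nat → Int → Int → Int
  | 0, _, count => count
  | fuel + 1, i, count =>
    if i < (cs.length : Int) then
      if (cs.length : Int) ≤ pvSkipWs cs i then count
      else
        match PySem.List.pyGet? cs (pvSkipWs cs i) with
        | none => count    -- Python raises here; unreachable under Pre_
        | some c =>
          if c = '{' then
            match pvScanA cs (pvSkipWs cs i) 0 with
            | some jc => pvOuterAF cs fuel (jc + 1) (count + 1)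
            | none => count
          else count
    else count

def count_macro_args_py (tex : String) (start : Int) : Int :=
  pvOuterAF tex.toList ((tex.toList.length : Int) - start).toNat start 0

-- ===== PORT B =====
-- B: one flat loop over the string with a depth counter (state: i, depth, count)
def pvLoopBF (cs : List Char) : Nat → Int → Int → Int → Int
  | 0, _, _, count => count
  | fuel + 1, i, depth, count =>
    if i < (cs.length : Int) then
      match PySem.List.pyGet? cs i with
      | none => count      -- Python raises here; unreachable under Pre_
      | some ch =>
        if depth = 0 then
          if ch = '{' then pvLoopBF cs fuel (i + 1) 1 count
          else if ¬ PySem.Chars.isspace ch then count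
          else pvLoopBF cs fuel (i + 1) 0 count
        else if ch = '\\' ∧ i + 1 < (cs.length : Int) then pvLoopBF cs fuel (i + 2) depth count
        else if ch = '{' then pvLoopBF cs fuel (i + 1) (depth + 1) count
        else if ch = '}' then
          if depth - 1 = 0 then pvLoopBF cs fuel (i + 1) 0 (count + 1)
          else pvLoopBF cs fuel (i + 1) (depth - 1) count
        else pvLoopBF cs fuel (i + 1) depth count
    else count

def pvLoopB (cs : List Char) (i depth count : Int) : Int :=
  pvLoopBF cs ((cs.length : Int) - i).toNat i depth count

def count_macro_args_py_alt (tex : String) (start : Int) : Int :=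
  pvLoopB tex.toList start 0 0

-- ===== PRECONDITION & SPEC =====
-- Pre_ excludes exactly the inputs where Python's tex[i] raises IndexError: start < -len(tex) (both A and B raise there).
def Pre_count_macro_args_py (tex : String) (start : Int) : Prop :=
  -(tex.toList.length : Int) ≤ start
instance (tex : String) (start : Int) : Decidable (Pre_count_macro_args_py tex start) := by unfold Pre_count_macro_args_py; infer_instance

def pvWitness_count_macro_args_py : String × Int := ("{a}{\\}b} x", 0)

def Spec_count_macro_args_py (tex : String) (start : Int) (out : Int) : Prop := out = count_macro_args_py_alt tex start
instance (tex : String) (start : Int) (out : Int) : Decidable (Spec_count_macro_args_py tex start out) := by unfold Spec_count_macro_args_py; infer_instance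

-- ===== CLAIM (what is proved, stated in full; the proofs are below) =====
def Claim_equal_count_macro_args_py : Prop := ∀ (tex : String) (start : Int), Dom_count_macro_args_py tex start → Pre_count_macro_args_py tex start → Spec_count_macro_args_py tex start (count_macro_args_py tex start)

-- ===== LEMMAS AND PROOFS =====

-- B's loop does not depend on the exact fuel, as long as it is sufficient
theorem pvLoopBF_irrel (cs : List Char) :
    ∀ (f g : Nat) (i depth count : Int), (cs.length : Int) - i ≤ f → (cs.length : Int) - i ≤ g →
      pvLoopBF cs f i depth count = pvLoopBF cs g i depth count := by
  intro f
  induction f with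
  | zero =>
    intro g i depth count hf hg
    cases g with
    | zero => rfl
    | succ g => simp [pvLoopBF, show ¬ i < (cs.length : Int) from by omega]
  | succ f ih =>
    intro g i depth count hf hg
    by_cases h : i < (cs.length : Int)
    · cases g with
      | zero => omega
      | succ g =>
        simp only [pvLoopBF, if_pos h]
        cases hget : PySem.List.pyGet? cs i with
        | none => rfl
        | some ch =>
          simp only
          by_cases hd : depth = 0
          · by_cases ho : ch = '{'
            · simp only [hd, ho]
              exact ih g _ _ _ (by omega) (by omega)
            · cases hsp : PySem.Chars.isspace ch with
              | true =>
                simp only [hd, if_neg ho]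
                exact ih g _ _ _ (by omega) (by omega)
              | false => simp [hd, ho]
          · by_cases hb : ch = '\\' ∧ i + 1 < (cs.length : Int)
            · simp only [if_neg hd, if_pos hb]
              exact ih g _ _ _ (by omega) (by omega)
            · by_cases ho : ch = '{'
              · simp only [if_neg hd, if_neg hb, if_pos ho]
                exact ih g _ _ _ (by omega) (by omega)
              · by_cases hc : ch = '}'
                · by_cases hz : depth - 1 = 0
                  · simp only [if_neg hd, if_neg hb, if_neg ho, if_pos hc, if_pos hz]
                    exact ih g _ _ _ (by omega) (by omega)
                  · simp only [if_neg hd, if_neg hb, if_neg ho, if_pos hc, if_neg hz]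
                    exact ih g _ _ _ (by omega) (by omega)
                · simp only [if_neg hd, if_neg hb, if_neg ho, if_neg hc]
                  exact ih g _ _ _ (by omega) (by omega)
    · cases g with
      | zero => simp [pvLoopBF, if_neg h]
      | succ g => simp only [pvLoopBF, if_neg h]

-- the whitespace skip never moves the index left
theorem pvSkipWsF_ge (cs : List Char) :
    ∀ (f : Nat) (i : Int), i ≤ pvSkipWsF cs f i := by
  intro f
  induction f with
  | zero => intro i; simp [pvSkipWsF]
  | succ f ih =>
    intro i
    simp only [pvSkipWsF]
    by_cases h : i < (cs.length : Int)
    · rw [if_pos h]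
      cases hget : PySem.List.pyGet? cs i with
      | none => simp
      | some c =>
        simp only
        by_cases hsp : PySem.Chars.isspace c
        · rw [if_pos hsp]; have := ih (i + 1); omega
        · rw [if_neg hsp]
    · rw [if_neg h]

-- A's inner scanner never reports a close left of where it started
theorem pvScanAF_ge (cs : List Char) :
    ∀ (f : Nat) (j depth jc : Int), pvScanAF cs f j depth = some jc → j ≤ jc := by
  intro f
  induction f with
  | zero => intro j depth jc h; simp [pvScanAF] at h
  | succ f ih =>
    intro j depth jc h
    simp only [pvScanAF] at h
    by_cases hj : j < (cs.length : Int)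
    · rw [if_pos hj] at h
      cases hget : PySem.List.pyGet? cs j with
      | none => rw [hget] at h; simp at h
      | some ch =>
        rw [hget] at h
        simp only at h
        by_cases hb : ch = '\\' ∧ j + 1 < (cs.length : Int)
        · rw [if_pos hb] at h; have := ih _ _ _ h; omega
        · rw [if_neg hb] at h
          by_cases ho : ch = '{'
          · rw [if_pos ho] at h; have := ih _ _ _ h; omega
          · rw [if_neg ho] at h
            by_cases hc : ch = '}'
            · rw [if_pos hc] at h
              by_cases hz : depth - 1 = 0
              · rw [if_pos hz] at h; cases h; omega
              · rw [if_neg hz] at h; have := ih _ _ _ h; omega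
            · rw [if_neg hc] at h; have := ih _ _ _ h; omega
    · rw [if_neg hj] at h; cases h

-- the character the whitespace skip stops on is not whitespace
theorem pvSkipWsF_stop (cs : List Char) :
    ∀ (f : Nat) (i : Int) (c : Char), (cs.length : Int) - i ≤ f →
      PySem.List.pyGet? cs (pvSkipWsF cs f i) = some c → PySem.Chars.isspace c = false := by
  intro f
  induction f with
  | zero =>
    intro i c hf h
    simp only [pvSkipWsF] at h
    have : PySem.List.pyGet? cs i = none := by
      rw [PySem.List.pyGet?_eq_none_iff]
      unfold PySem.Raise.InRange
      omega
    rw [h] at this; cases this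
  | succ f ih =>
    intro i c hf h
    simp only [pvSkipWsF] at h
    by_cases hlt : i < (cs.length : Int)
    · rw [if_pos hlt] at h
      cases hget : PySem.List.pyGet? cs i with
      | none => rw [hget] at h; simp only at h; rw [h] at hget; cases hget
      | some c' =>
        rw [hget] at h
        simp only at h
        by_cases hsp : PySem.Chars.isspace c'
        · rw [if_pos hsp] at h; exact ih _ _ (by omega) h
        · rw [if_neg hsp] at h
          rw [h] at hget; cases hget
          simpa using hsp
    · rw [if_neg hlt] at h
      exfalso
      have : PySem.List.pyGet? cs i = none := by
        rw [PySem.List.pyGet?_eq_none_iff]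
        unfold PySem.Raise.InRange
        omega
      rw [h] at this; cases this

-- skipping whitespace does not change B's loop at depth 0 (fuel runs in step with the skip)
theorem pvLoopBF_skip (cs : List Char) :
    ∀ (f : Nat) (i count : Int), (cs.length : Int) - i ≤ f →
      pvLoopBF cs f i 0 count = pvLoopB cs (pvSkipWsF cs f i) 0 count := by
  intro f
  induction f with
  | zero =>
    intro i count hf
    simp only [pvLoopBF, pvSkipWsF, pvLoopB]
    rw [show ((cs.length : Int) - i).toNat = 0 from by omega]
    rfl
  | succ f ih =>
    intro i count hf
    by_cases h : i < (cs.length : Int)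
    · have hk : ((cs.length : Int) - i).toNat = ((cs.length : Int) - (i + 1)).toNat + 1 := by omega
      cases hget : PySem.List.pyGet? cs i with
      | none =>
        simp only [pvLoopBF, pvSkipWsF, if_pos h, hget]
        simp only [pvLoopB]
        rw [hk]
        simp only [pvLoopBF, if_pos h, hget]
      | some ch =>
        cases hsp : PySem.Chars.isspace ch with
        | true =>
          have hnb : ch ≠ '{' := by
            intro hEq; subst hEq; simp [PySem.Chars.isspace] at hsp
          simp only [pvLoopBF, pvSkipWsF, if_pos h, hget, if_neg hnb, hsp]
          exact ih _ _ (by omega)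
        | false =>
          have hstop : pvSkipWsF cs (f + 1) i = i := by
            simp [pvSkipWsF, h, hget, hsp]
          rw [hstop]
          simp only [pvLoopB]
          rw [hk]
          simp only [pvLoopBF, if_pos h, hget]
          by_cases ho : ch = '{'
          · simp only [ho]
            exact pvLoopBF_irrel cs _ _ _ _ _ (by omega) (by omega)
          · simp [ho, hsp]
    · have h0 : ((cs.length : Int) - i).toNat = 0 := by omega
      simp only [pvLoopBF, pvSkipWsF, if_neg h, pvLoopB]
      rw [h0]
      simp only [pvLoopBF]

-- inside a group (depth ≥ 1) B's loop equals: scan to the close with A's inner scanner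
-- (same fuel on both sides — the two loops step through the same indices), then continue
theorem pvLoopBF_scan (cs : List Char) :
    ∀ (f : Nat) (j depth count : Int), (cs.length : Int) - j ≤ f → 1 ≤ depth →
      pvLoopBF cs f j depth count =
        (match pvScanAF cs f j depth with
         | some jc => pvLoopB cs (jc + 1) 0 (count + 1)
         | none => count) := by
  intro f
  induction f with
  | zero => intro j depth count hf hd; simp [pvLoopBF, pvScanAF]
  | succ f ih =>
    intro j depth count hf hd
    simp only [pvLoopBF, pvScanAF]
    by_cases h : j < (cs.length : Int)
    · rw [if_pos h, if_pos h]
      cases hget : PySem.List.pyGet? cs j with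
      | none => simp
      | some ch =>
        simp only
        rw [if_neg (by omega : ¬ depth = 0)]
        by_cases hb : ch = '\\' ∧ j + 1 < (cs.length : Int)
        · rw [if_pos hb, if_pos hb]
          exact ih _ _ _ (by omega) hd
        · rw [if_neg hb, if_neg hb]
          by_cases ho : ch = '{'
          · rw [if_pos ho, if_pos ho]
            exact ih _ _ _ (by omega) (by omega)
          · rw [if_neg ho, if_neg ho]
            by_cases hc : ch = '}'
            · rw [if_pos hc, if_pos hc]
              by_cases hz : depth - 1 = 0
              · rw [if_pos hz, if_pos hz]
                simp only [pvLoopB]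
                exact pvLoopBF_irrel cs _ _ _ _ _ (by omega) (by omega)
              · rw [if_neg hz, if_neg hz]
                exact ih _ _ _ (by omega) (by omega)
            · rw [if_neg hc, if_neg hc]
              exact ih _ _ _ (by omega) hd
    · rw [if_neg h, if_neg h]

-- main loop equivalence at the fuel level: A's outer loop equals B's flat loop at depth 0
theorem pvOuterAF_eq (cs : List Char) :
    ∀ (f : Nat) (i count : Int), (cs.length : Int) - i ≤ f →
      pvOuterAF cs f i count = pvLoopB cs i 0 count := by
  intro f
  induction f with
  | zero =>
    intro i count hf
    simp only [pvOuterAF, pvLoopB]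
    rw [show ((cs.length : Int) - i).toNat = 0 from by omega]
    rfl
  | succ f ih =>
    intro i count hf
    by_cases h : i < (cs.length : Int)
    · have hws : pvLoopB cs i 0 count = pvLoopB cs (pvSkipWs cs i) 0 count := by
        simp only [pvLoopB, pvSkipWs]
        exact pvLoopBF_skip cs _ _ _ (by omega)
      have hge : i ≤ pvSkipWs cs i := pvSkipWsF_ge cs _ i
      simp only [pvOuterAF, if_pos h]
      rw [hws]
      by_cases h1 : (cs.length : Int) ≤ pvSkipWs cs i
      · rw [if_pos h1]
        simp only [pvLoopB]
        rw [show ((cs.length : Int) - pvSkipWs cs i).toNat = 0 from by omega]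
        rfl
      · rw [if_neg h1]
        have hk : ((cs.length : Int) - pvSkipWs cs i).toNat
            = ((cs.length : Int) - (pvSkipWs cs i + 1)).toNat + 1 := by omega
        cases hget : PySem.List.pyGet? cs (pvSkipWs cs i) with
        | none =>
          simp only [pvLoopB]
          rw [hk]
          simp only [pvLoopBF, if_pos (by omega : pvSkipWs cs i < (cs.length : Int)), hget]
        | some c =>
          simp only
          by_cases hoc : c = '{'
          · rw [if_pos hoc]
            -- one step of both the scanner and B's loop past the opening brace
            have hscan : pvScanA cs (pvSkipWs cs i) 0
                = pvScanAF cs ((cs.length : Int) - (pvSkipWs cs i + 1)).toNat (pvSkipWs cs i + 1) 1 := by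
              simp only [pvScanA]
              rw [hk]
              simp only [pvScanAF, if_pos (by omega : pvSkipWs cs i < (cs.length : Int)), hget, hoc]
              simp
            have hloop : pvLoopB cs (pvSkipWs cs i) 0 count
                = pvLoopBF cs ((cs.length : Int) - (pvSkipWs cs i + 1)).toNat (pvSkipWs cs i + 1) 1 count := by
              simp only [pvLoopB]
              rw [hk]
              simp only [pvLoopBF, if_pos (by omega : pvSkipWs cs i < (cs.length : Int)), hget, hoc]
              simp
            rw [hloop, pvLoopBF_scan cs _ _ _ _ (by omega) (by omega), ← hscan]
            cases hs : pvScanA cs (pvSkipWs cs i) 0 with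
            | some jc =>
              have hjc : pvSkipWs cs i ≤ jc := pvScanAF_ge cs _ _ _ _ hs
              simp only
              exact ih _ _ (by omega)
            | none => simp
          · rw [if_neg hoc]
            have hnsp : PySem.Chars.isspace c = false := by
              simp only [pvSkipWs] at hget
              exact pvSkipWsF_stop cs _ _ _ (by omega) hget
            simp only [pvLoopB]
            rw [hk]
            simp only [pvLoopBF, if_pos (by omega : pvSkipWs cs i < (cs.length : Int)), hget]
            simp [hoc, hnsp]
    · simp only [pvOuterAF, if_neg h, pvLoopB]
      rw [show ((cs.length : Int) - i).toNat = 0 from by omega]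
      rfl

-- ===== VERDICT (by name: the statement is the Claim_ definition above) =====
theorem count_macro_args_py_spec : Claim_equal_count_macro_args_py := by
  intro tex start _ _
  unfold Spec_count_macro_args_py count_macro_args_py count_macro_args_py_alt pvLoopB
  rw [pvOuterAF_eq tex.toList _ start 0 (by omega)]
  rfl
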